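-- pv_equiv track=rewrite | github.com/jramaswami/Binary_Search_Python | intersecting_lines.py | solve
-- ===== SOURCE A (Python) =====
-- class Point:
--
--     def __init__(self, x, y):
--         self.x = x
--         self.y = y
--
--     def __sub__(self, other):
--         return Point(self.x - other.x, self.y - other.y)
--
--     def __add__(self, other):
--         return Point(self.x + other.x, self.y + other.y)
--
--     def __mul__(self, other):
--         "Cross product"
--         return (self.x * other.y) - (other.x * self.y)
--
--     def __repr__(self):
--         return f"Point({self.x}, {self.y})"
--
-- def direction(pi, pj, pk):
--     return (pk - pi) * (pj - pi)
--
-- def on_segment(pi, pj, pk):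
--     if min(pi.x, pj.x) <= pk.x  <= max(pi.x, pj.x) and min(pi.y, pj.y) <= pk.y <= max(pi.y, pj.y):
--         return True
--     return False
--
-- def segments_intersect(p1, p2, p3, p4):
--     d1 = direction(p3, p4, p1);
--     d2 = direction(p3, p4, p2);
--     d3 = direction(p1, p2, p3);
--     d4 = direction(p1, p2, p4);
--     if ((d1 > 0 and d2 < 0) or (d1 < 0 and d2 > 0)) and ((d3 > 0 and d4 < 0) or (d3 < 0 and d4 > 0)):
--         return True
--     elif d1 == 0 and on_segment(p3, p4, p1):
--         return True
--     elif d2 == 0 and on_segment(p3, p4, p2):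
--         return True
--     elif d3 == 0 and on_segment(p1, p2, p3):
--         return True
--     elif d4 == 0 and on_segment(p1, p2, p4):
--         return True
--     return False
--
-- def f(slope, constant, x):
--     return (slope * x) + constant
--
-- def solve(lines, low, high):
--     START = -1
--     STOP = 1
--
--     EPS = pow(10, -9)
--
--     # Transform lines into line segments.
--     segments = []
--     events = []
--     for i, (m, b) in enumerate(lines):
--         low_p = Point(low, f(m, b, low))
--         high_p = Point(high, f(m, b, high))
--         if high_p.y < low_p.y:
--             low_p, high_p = high_p, low_p
--         segments.append((low_p, high_p))
--         low_y = low_p.y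
--         high_y = high_p.y
--         events.append((low_y, START, i))
--         events.append((high_y, STOP, i))
--
--     events.sort()
--     active = set()
--     overlaps = [0 for _ in lines]
--     for _, etype, i in events:
--         p1, p2 = segments[i]
--         if etype == START:
--             for j in active:
--                 p3, p4 = segments[j]
--                 if segments_intersect(p1, p2, p3, p4):
--                     overlaps[i] = 1
--                     overlaps[j] = 1
--             active.add(i)
--         else:
--             active.remove(i)
--     return sum(overlaps)
-- ===== SOURCE B (Python) =====
-- def solve(lines, low, high):
--     # A line intersects another within the strip iff the differences of their
--     # y-values at x=low and x=high do not have the same strict sign.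
--     ys = [(m * low + b, m * high + b) for m, b in lines]
--     total = 0
--     for i, (a1, b1) in enumerate(ys):
--         if any((a1 - a2) * (b1 - b2) <= 0
--                for k, (a2, b2) in enumerate(ys) if k != i):
--             total += 1
--     return total
-- ===== Notes on version B (the rewrite author's own statement) =====
-- stated objective: faster
-- what changed: A builds geometric segments, sorts start/stop events and sweeps them with an active set, testing pairs with a full cross-product/on-segment intersection predicate; B notes that all segments span the same x-interval, so two lines' segments intersect iff the differences of their y-values at x=low and x=high do not have the same strict sign, and counts lines with a short-circuiting pairwise sign test.
import Mathlib
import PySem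

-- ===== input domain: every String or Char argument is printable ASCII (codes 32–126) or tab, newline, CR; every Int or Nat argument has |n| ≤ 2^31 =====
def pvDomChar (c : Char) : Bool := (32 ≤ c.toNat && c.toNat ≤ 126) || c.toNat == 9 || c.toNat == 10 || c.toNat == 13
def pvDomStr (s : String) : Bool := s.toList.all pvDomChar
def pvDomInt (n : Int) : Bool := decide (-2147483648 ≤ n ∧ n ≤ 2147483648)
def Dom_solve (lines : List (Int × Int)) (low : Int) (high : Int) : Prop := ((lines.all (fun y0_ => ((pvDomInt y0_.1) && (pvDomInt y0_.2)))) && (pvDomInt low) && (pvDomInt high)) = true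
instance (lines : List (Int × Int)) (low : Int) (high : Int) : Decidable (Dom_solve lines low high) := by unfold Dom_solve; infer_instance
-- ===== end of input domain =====

-- B replaces A's event-sort + sweep-with-active-set + full segment-intersection
-- predicate by a direct pairwise sign test on the y-differences at the two strip
-- edges; the equivalence (A = B on all inputs) is proved below.

-- ===== PORT A =====
def pvDirection (p q r : Int × Int) : Int :=
  (r.1 - p.1) * (q.2 - p.2) - (q.1 - p.1) * (r.2 - p.2)

def pvOnSegment (p q r : Int × Int) : Bool :=
  decide (min p.1 q.1 ≤ r.1) && decide (r.1 ≤ max p.1 q.1) &&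
  decide (min p.2 q.2 ≤ r.2) && decide (r.2 ≤ max p.2 q.2)

def pvSegInt (p1 p2 p3 p4 : Int × Int) : Bool :=
  let d1 := pvDirection p3 p4 p1
  let d2 := pvDirection p3 p4 p2
  let d3 := pvDirection p1 p2 p3
  let d4 := pvDirection p1 p2 p4
  if ((decide (d1 > 0) && decide (d2 < 0)) || (decide (d1 < 0) && decide (d2 > 0))) &&
     ((decide (d3 > 0) && decide (d4 < 0)) || (decide (d3 < 0) && decide (d4 > 0))) then true
  else if d1 == 0 && pvOnSegment p3 p4 p1 then true
  else if d2 == 0 && pvOnSegment p3 p4 p2 then true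
  else if d3 == 0 && pvOnSegment p1 p2 p3 then true
  else if d4 == 0 && pvOnSegment p1 p2 p4 then true
  else false

def pvF (slope constant x : Int) : Int := slope * x + constant

def pvLexLt (a b : Int × Int × Int) : Bool :=
  decide (a.1 < b.1) ||
  (decide (a.1 = b.1) &&
    (decide (a.2.1 < b.2.1) || (decide (a.2.1 = b.2.1) && decide (a.2.2 < b.2.2))))

def pvBuildStep (low high : Int)
    (st : List ((Int × Int) × (Int × Int)) × List (Int × Int × Int))
    (e : Int × (Int × Int)) :
    List ((Int × Int) × (Int × Int)) × List (Int × Int × Int) :=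
  let lowP : Int × Int := (low, pvF e.2.1 e.2.2 low)
  let highP : Int × Int := (high, pvF e.2.1 e.2.2 high)
  let sw := if highP.2 < lowP.2 then (highP, lowP) else (lowP, highP)
  (st.1 ++ [sw], st.2 ++ [(sw.1.2, -1, e.1), (sw.2.2, 1, e.1)])

def pvSortEv (xs : List (Int × Int × Int)) : List (Int × Int × Int) :=
  xs.foldl (fun acc x => PySem.List.insertBy pvLexLt x acc) []

def pvStep (segments : List ((Int × Int) × (Int × Int)))
    (st : PySem.Set Int × List Int) (ev : Int × Int × Int) : PySem.Set Int × List Int :=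
  let sgi := PySem.List.pyGetD segments ev.2.2 ((0, 0), (0, 0))
  if ev.2.1 == -1 then
    let ov := st.1.foldl (fun ov j =>
      let sgj := PySem.List.pyGetD segments j ((0, 0), (0, 0))
      if pvSegInt sgi.1 sgi.2 sgj.1 sgj.2 then
        PySem.List.pySetD (PySem.List.pySetD ov ev.2.2 1) j 1
      else ov) st.2
    (PySem.Set.add st.1 ev.2.2, ov)
  else
    ((PySem.Set.remove? st.1 ev.2.2).getD st.1, st.2)

def solve (lines : List (Int × Int)) (low : Int) (high : Int) : Int :=
  let build := (PySem.List.enumerate lines 0).foldl (pvBuildStep low high) ([], [])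
  let segments := build.1
  let events := pvSortEv build.2
  let final := events.foldl (pvStep segments) (PySem.Set.empty, lines.map (fun _ => (0 : Int)))
  final.2.sum

-- ===== PORT B =====
def solve_alt (lines : List (Int × Int)) (low : Int) (high : Int) : Int :=
  let ys := lines.map (fun p => (p.1 * low + p.2, p.1 * high + p.2))
  (PySem.List.enumerate ys 0).foldl (fun total e =>
    if (PySem.List.enumerate ys 0).any (fun e2 =>
        !(decide (e2.1 = e.1)) && decide ((e.2.1 - e2.2.1) * (e.2.2 - e2.2.2) ≤ 0))
    then total + 1 else total) 0


-- ===== PRECONDITION & SPEC =====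
def Spec_solve (lines : List (Int × Int)) (low : Int) (high : Int) (out : Int) : Prop := out = solve_alt lines low high
instance (lines : List (Int × Int)) (low : Int) (high : Int) (out : Int) : Decidable (Spec_solve lines low high out) := by unfold Spec_solve; infer_instance

-- ===== CLAIM (what is proved, stated in full; the proofs are below) =====
def Claim_equal_solve : Prop := ∀ (lines : List (Int × Int)) (low : Int) (high : Int), Dom_solve lines low high → Spec_solve lines low high (solve lines low high)

-- ===== LEMMAS AND PROOFS =====
-- ==== proof-layer definitions ====
abbrev pvA (lines : List (Int × Int)) (low : Int) (k : Nat) : Int :=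
  (lines.getD k (0, 0)).1 * low + (lines.getD k (0, 0)).2
abbrev pvInter (lines : List (Int × Int)) (low high : Int) (k l : Nat) : Prop :=
  (pvA lines low k - pvA lines low l) * (pvA lines high k - pvA lines high l) ≤ 0
def pvSeg (lines : List (Int × Int)) (low high : Int) (k : Nat) : (Int × Int) × (Int × Int) :=
  if pvA lines high k < pvA lines low k
  then ((high, pvA lines high k), (low, pvA lines low k))
  else ((low, pvA lines low k), (high, pvA lines high k))
def pvSEv (lines : List (Int × Int)) (low high : Int) (k : Nat) : Int × Int × Int :=
  (min (pvA lines low k) (pvA lines high k), -1, (k : Int))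
def pvTEv (lines : List (Int × Int)) (low high : Int) (k : Nat) : Int × Int × Int :=
  (max (pvA lines low k) (pvA lines high k), 1, (k : Int))
def pvSegL (lines : List (Int × Int)) (low high : Int) : List ((Int × Int) × (Int × Int)) :=
  (List.range lines.length).map (pvSeg lines low high)
def pvEvL (lines : List (Int × Int)) (low high : Int) : List (Int × Int × Int) :=
  (List.range lines.length).flatMap (fun k => [pvSEv lines low high k, pvTEv lines low high k])
def pvLexLe (a b : Int × Int × Int) : Prop :=
  a.1 < b.1 ∨ (a.1 = b.1 ∧ (a.2.1 < b.2.1 ∨ (a.2.1 = b.2.1 ∧ a.2.2 ≤ b.2.2)))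
def pvLexLtP (a b : Int × Int × Int) : Prop :=
  a.1 < b.1 ∨ (a.1 = b.1 ∧ (a.2.1 < b.2.1 ∨ (a.2.1 = b.2.1 ∧ a.2.2 < b.2.2)))

-- ==== lexicographic order facts ====
theorem lexLe_trans {a b c : Int × Int × Int} (h1 : pvLexLe a b) (h2 : pvLexLe b c) : pvLexLe a c := by
  obtain ⟨a1, a2, a3⟩ := a; obtain ⟨b1, b2, b3⟩ := b; obtain ⟨c1, c2, c3⟩ := c
  simp only [pvLexLe] at h1 h2 ⊢; omega

theorem lexLt_le {a b : Int × Int × Int} (h : pvLexLt a b = true) : pvLexLe a b := by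
  unfold pvLexLt at h; unfold pvLexLe
  simp only [Bool.or_eq_true, Bool.and_eq_true, decide_eq_true_eq] at h
  omega

theorem lexLt_not {a b : Int × Int × Int} (h : pvLexLt a b = false) : pvLexLe b a := by
  unfold pvLexLt at h; unfold pvLexLe
  simp only [Bool.or_eq_false_iff, Bool.and_eq_false_iff, decide_eq_false_iff_not] at h
  omega

theorem lexLtP_not_le {a b : Int × Int × Int} (h : pvLexLtP a b) (h2 : pvLexLe b a) : False := by
  unfold pvLexLtP at h; unfold pvLexLe at h2; omega

-- ==== sort lemmas ====
theorem insertBy_perm (x : Int × Int × Int) (ys : List (Int × Int × Int)) :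
    (PySem.List.insertBy pvLexLt x ys).Perm (x :: ys) := by
  induction ys with
  | nil => simp [PySem.List.insertBy]
  | cons y ys ih =>
    unfold PySem.List.insertBy
    by_cases h : pvLexLt x y = true
    · simp [h]
    · simp only [Bool.not_eq_true] at h
      simp only [h]
      exact (ih.cons y).trans (List.Perm.swap x y ys)

theorem sortEv_perm_aux (xs acc : List (Int × Int × Int)) :
    (xs.foldl (fun acc x => PySem.List.insertBy pvLexLt x acc) acc).Perm (acc ++ xs) := by
  induction xs generalizing acc with
  | nil => simp
  | cons x xs ih =>
    simp only [List.foldl_cons]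
    refine (ih _).trans ?_
    refine (((insertBy_perm x acc).append_right xs).trans ?_)
    exact List.perm_middle.symm
theorem sortEv_perm (xs : List (Int × Int × Int)) : (pvSortEv xs).Perm xs := by
  simpa using sortEv_perm_aux xs []

theorem insertBy_pairwise (x : Int × Int × Int) (ys : List (Int × Int × Int))
    (h : ys.Pairwise pvLexLe) : (PySem.List.insertBy pvLexLt x ys).Pairwise pvLexLe := by
  induction ys with
  | nil => simp [PySem.List.insertBy]
  | cons y ys ih =>
    rw [List.pairwise_cons] at h
    unfold PySem.List.insertBy
    by_cases hlt : pvLexLt x y = true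
    · simp only [hlt, if_true]
      refine List.Pairwise.cons ?_ (List.Pairwise.cons h.1 h.2)
      intro z hz
      rcases List.mem_cons.mp hz with rfl | hz
      · exact lexLt_le hlt
      · exact lexLe_trans (lexLt_le hlt) (h.1 z hz)
    · simp only [Bool.not_eq_true] at hlt
      simp only [hlt, Bool.false_eq_true, if_false]
      refine List.Pairwise.cons ?_ (ih h.2)
      intro z hz
      rcases (PySem.List.mem_insertBy pvLexLt x z ys).mp hz with rfl | hz
      · exact lexLt_not hlt
      · exact h.1 z hz

theorem sortEv_pairwise_aux (xs acc : List (Int × Int × Int)) (h : acc.Pairwise pvLexLe) :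
    (xs.foldl (fun acc x => PySem.List.insertBy pvLexLt x acc) acc).Pairwise pvLexLe := by
  induction xs generalizing acc with
  | nil => simpa
  | cons x xs ih => exact ih _ (insertBy_pairwise x acc h)
theorem sortEv_pairwise (xs : List (Int × Int × Int)) : (pvSortEv xs).Pairwise pvLexLe := by
  exact sortEv_pairwise_aux xs [] (by simp)

-- ==== event list facts ====
theorem mem_pvEvL (lines : List (Int × Int)) (low high : Int) (x : Int × Int × Int) :
    x ∈ pvEvL lines low high ↔
      ∃ k, k < lines.length ∧ (x = pvSEv lines low high k ∨ x = pvTEv lines low high k) := by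
  unfold pvEvL
  simp [List.mem_flatMap, List.mem_range]

theorem sEv_ne_tEv (lines : List (Int × Int)) (low high : Int) (k l : Nat) :
    pvSEv lines low high k ≠ pvTEv lines low high l := by
  unfold pvSEv pvTEv
  intro h
  have := congrArg (fun p => p.2.1) h
  simp at this

theorem sEv_inj (lines : List (Int × Int)) (low high : Int) (k l : Nat)
    (h : pvSEv lines low high k = pvSEv lines low high l) : k = l := by
  unfold pvSEv at h
  have := congrArg (fun p => p.2.2) h
  simp at this
  exact_mod_cast this

theorem tEv_inj (lines : List (Int × Int)) (low high : Int) (k l : Nat)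
    (h : pvTEv lines low high k = pvTEv lines low high l) : k = l := by
  unfold pvTEv at h
  have := congrArg (fun p => p.2.2) h
  simp at this
  exact_mod_cast this

theorem nodup_pvEvL (lines : List (Int × Int)) (low high : Int) :
    (pvEvL lines low high).Nodup := by
  unfold pvEvL
  rw [List.nodup_flatMap]
  constructor
  · intro k _
    simp [sEv_ne_tEv lines low high k k]
  · refine List.Pairwise.imp ?_ (List.pairwise_lt_range (n := lines.length))
    intro k l hkl
    simp only [List.disjoint_left]
    intro x hx hx2
    have hkl' : k ≠ l := Nat.ne_of_lt hkl
    simp only [List.mem_cons, List.not_mem_nil, or_false] at hx hx2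
    rcases hx with rfl | rfl
    · rcases hx2 with h2 | h2
      · exact hkl' (sEv_inj lines low high k l h2)
      · exact sEv_ne_tEv lines low high k l h2
    · rcases hx2 with h2 | h2
      · exact (sEv_ne_tEv lines low high l k h2.symm)
      · exact hkl' (tEv_inj lines low high k l h2)

-- strict order between a line's own events
theorem sEv_lt_tEv (lines : List (Int × Int)) (low high : Int) (k : Nat) :
    pvLexLtP (pvSEv lines low high k) (pvTEv lines low high k) := by
  unfold pvSEv pvTEv pvLexLtP
  rcases lt_trichotomy (pvA lines low k) (pvA lines high k) with h | h | h
  · left; simp only; omega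
  · right; constructor
    · simp only; omega
    · left; simp only; norm_num
  · left; simp only; omega

-- interval overlap from intersection
theorem inter_overlap (lines : List (Int × Int)) (low high : Int) (k l : Nat)
    (h : pvInter lines low high k l) :
    min (pvA lines low k) (pvA lines high k) ≤ max (pvA lines low l) (pvA lines high l) ∧
    min (pvA lines low l) (pvA lines high l) ≤ max (pvA lines low k) (pvA lines high k) := by
  unfold pvInter at h
  set ak := pvA lines low k; set bk := pvA lines high k
  set al := pvA lines low l; set bl := pvA lines high l
  constructor
  · rcases le_or_gt ak al with h1 | h1
    · have : min ak bk ≤ ak := min_le_left _ _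
      have : al ≤ max al bl := le_max_left _ _
      omega
    · have h2 : bk ≤ bl := by nlinarith
      have : min ak bk ≤ bk := min_le_right _ _
      have : bl ≤ max al bl := le_max_right _ _
      omega
  · rcases le_or_gt al ak with h1 | h1
    · have : min al bl ≤ al := min_le_left _ _
      have : ak ≤ max ak bk := le_max_left _ _
      omega
    · have h2 : bl ≤ bk := by nlinarith
      have : min al bl ≤ bl := min_le_right _ _
      have : bk ≤ max ak bk := le_max_right _ _
      omega

theorem inter_comm (lines : List (Int × Int)) (low high : Int) (k l : Nat) :
    pvInter lines low high k l ↔ pvInter lines low high l k := by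
  unfold pvInter
  constructor <;> intro h <;> nlinarith

theorem pvSegInt_true_iff (p1 p2 p3 p4 : Int × Int) :
    pvSegInt p1 p2 p3 p4 = true ↔
      (((0 < pvDirection p3 p4 p1 ∧ pvDirection p3 p4 p2 < 0) ∨
        (pvDirection p3 p4 p1 < 0 ∧ 0 < pvDirection p3 p4 p2)) ∧
       ((0 < pvDirection p1 p2 p3 ∧ pvDirection p1 p2 p4 < 0) ∨
        (pvDirection p1 p2 p3 < 0 ∧ 0 < pvDirection p1 p2 p4))) ∨
      (pvDirection p3 p4 p1 = 0 ∧ pvOnSegment p3 p4 p1 = true) ∨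
      (pvDirection p3 p4 p2 = 0 ∧ pvOnSegment p3 p4 p2 = true) ∨
      (pvDirection p1 p2 p3 = 0 ∧ pvOnSegment p1 p2 p3 = true) ∨
      (pvDirection p1 p2 p4 = 0 ∧ pvOnSegment p1 p2 p4 = true) := by
  unfold pvSegInt
  simp only []
  split_ifs with c1 c2 c3 c4 c5 <;>
    simp_all [Bool.and_eq_true, Bool.or_eq_true, decide_eq_true_eq, beq_iff_eq] <;> tauto

theorem pvOnSegment_true_iff (p1 p2 p3 : Int × Int) :
    pvOnSegment p1 p2 p3 = true ↔
      (min p1.1 p2.1 ≤ p3.1 ∧ p3.1 ≤ max p1.1 p2.1 ∧ min p1.2 p2.2 ≤ p3.2 ∧ p3.2 ≤ max p1.2 p2.2) := by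
  unfold pvOnSegment
  simp [Bool.and_eq_true, decide_eq_true_eq, and_assoc]

theorem segInt_core (low high a1 b1 a2 b2 : Int)
    (h1 : low = high → a1 = b1) (h2 : low = high → a2 = b2) :
    pvSegInt ((if b1 < a1 then ((high, b1), (low, a1)) else ((low, a1), (high, b1))).1)
             ((if b1 < a1 then ((high, b1), (low, a1)) else ((low, a1), (high, b1))).2)
             ((if b2 < a2 then ((high, b2), (low, a2)) else ((low, a2), (high, b2))).1)
             ((if b2 < a2 then ((high, b2), (low, a2)) else ((low, a2), (high, b2))).2)
      = decide ((a1 - a2) * (b1 - b2) ≤ 0) := by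
  rw [Bool.eq_iff_iff, decide_eq_true_eq]
  split_ifs with hb1 hb2 hb2
  · rw [pvSegInt_true_iff]
    have e1 : pvDirection (high, b2) (low, a2) (high, b1) = ((high - low) * (b1 - b2)) := by
      simp only [pvDirection]; ring
    have e2 : pvDirection (high, b2) (low, a2) (low, a1) = ((high - low) * (a1 - a2)) := by
      simp only [pvDirection]; ring
    have e3 : pvDirection (high, b1) (low, a1) (high, b2) = -((high - low) * (b1 - b2)) := by
      simp only [pvDirection]; ring
    have e4 : pvDirection (high, b1) (low, a1) (low, a2) = -((high - low) * (a1 - a2)) := by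
      simp only [pvDirection]; ring
    rw [e1, e2, e3, e4, pvOnSegment_true_iff, pvOnSegment_true_iff, pvOnSegment_true_iff, pvOnSegment_true_iff]
    dsimp only
    by_cases hw : low = high
    · have ha := h1 hw; have hb := h2 hw
      subst hw; subst ha; subst hb
      constructor
      · rintro (⟨hA, -⟩ | ⟨-, hOS⟩ | ⟨-, hOS⟩ | ⟨-, hOS⟩ | ⟨-, hOS⟩)
        · exfalso; rcases hA with ⟨hp, hq⟩ | ⟨hp, hq⟩ <;> (ring_nf at hp; omega)
        all_goals (rw [(by omega : a1 - a2 = 0), zero_mul])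
      · intro hP
        have key : a1 - a2 = 0 := by nlinarith [sq_nonneg (a1 - a2)]
        refine Or.inr (Or.inl ⟨by ring, ?_⟩)
        omega
    · have hwne : high - low ≠ 0 := by omega
      constructor
      · rintro (⟨⟨hp, hq⟩ | ⟨hp, hq⟩, -⟩ | ⟨hd, -⟩ | ⟨hd, -⟩ | ⟨hd, -⟩ | ⟨hd, -⟩)
        · nlinarith [mul_pos hp (neg_pos.mpr hq), sq_nonneg (high - low)]
        · nlinarith [mul_pos (neg_pos.mpr hp) hq, sq_nonneg (high - low)]
        · have h0 : (high - low) * (b1 - b2) = 0 := by linarith [hd]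
          rcases mul_eq_zero.mp h0 with h | h
          · exact absurd h hwne
          · rw [h, mul_zero]
        · have h0 : (high - low) * (a1 - a2) = 0 := by linarith [hd]
          rcases mul_eq_zero.mp h0 with h | h
          · exact absurd h hwne
          · rw [h, zero_mul]
        · have h0 : (high - low) * (b1 - b2) = 0 := by linarith [hd]
          rcases mul_eq_zero.mp h0 with h | h
          · exact absurd h hwne
          · rw [h, mul_zero]
        · have h0 : (high - low) * (a1 - a2) = 0 := by linarith [hd]
          rcases mul_eq_zero.mp h0 with h | h
          · exact absurd h hwne
          · rw [h, zero_mul]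
      · intro hP
        rcases lt_trichotomy (a1 - a2) 0 with hu | hu | hu
        · rcases lt_trichotomy (b1 - b2) 0 with hv | hv | hv
          · exact absurd hP (not_le.mpr (mul_pos_of_neg_of_neg hu hv))
          refine Or.inr (Or.inl ⟨?_, ?_⟩)
          · rw [(by omega : (b1 - b2) = 0)]; ring
          · omega
          rcases lt_trichotomy (high - low) 0 with hw1 | hw1 | hw1
          · -- w < 0
            have hX1 := mul_neg_of_neg_of_pos hw1 hv
            have hX2 := mul_pos_of_neg_of_neg hw1 hu
            have hX3 := mul_neg_of_neg_of_pos hw1 hv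
            have hX4 := mul_pos_of_neg_of_neg hw1 hu
            exact Or.inl ⟨Or.inr ⟨by linarith [hX1], by linarith [hX2]⟩, Or.inl ⟨by linarith [hX3], by linarith [hX4]⟩⟩
          · exact absurd hw1 hwne
          · -- w > 0
            have hX1 := mul_pos hw1 hv
            have hX2 := mul_neg_of_pos_of_neg hw1 hu
            have hX3 := mul_pos hw1 hv
            have hX4 := mul_neg_of_pos_of_neg hw1 hu
            exact Or.inl ⟨Or.inl ⟨by linarith [hX1], by linarith [hX2]⟩, Or.inr ⟨by linarith [hX3], by linarith [hX4]⟩⟩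
        refine Or.inr (Or.inr (Or.inl ⟨?_, ?_⟩))
        · rw [(by omega : (a1 - a2) = 0)]; ring
        · omega
        · rcases lt_trichotomy (b1 - b2) 0 with hv | hv | hv
          rcases lt_trichotomy (high - low) 0 with hw1 | hw1 | hw1
          · -- w < 0
            have hX1 := mul_pos_of_neg_of_neg hw1 hv
            have hX2 := mul_neg_of_neg_of_pos hw1 hu
            have hX3 := mul_pos_of_neg_of_neg hw1 hv
            have hX4 := mul_neg_of_neg_of_pos hw1 hu
            exact Or.inl ⟨Or.inl ⟨by linarith [hX1], by linarith [hX2]⟩, Or.inr ⟨by linarith [hX3], by linarith [hX4]⟩⟩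
          · exact absurd hw1 hwne
          · -- w > 0
            have hX1 := mul_neg_of_pos_of_neg hw1 hv
            have hX2 := mul_pos hw1 hu
            have hX3 := mul_neg_of_pos_of_neg hw1 hv
            have hX4 := mul_pos hw1 hu
            exact Or.inl ⟨Or.inr ⟨by linarith [hX1], by linarith [hX2]⟩, Or.inl ⟨by linarith [hX3], by linarith [hX4]⟩⟩
          refine Or.inr (Or.inl ⟨?_, ?_⟩)
          · rw [(by omega : (b1 - b2) = 0)]; ring
          · omega
          · exact absurd hP (not_le.mpr (mul_pos hu hv))
  · rw [pvSegInt_true_iff]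
    have e1 : pvDirection (low, a2) (high, b2) (high, b1) = -((high - low) * (b1 - b2)) := by
      simp only [pvDirection]; ring
    have e2 : pvDirection (low, a2) (high, b2) (low, a1) = -((high - low) * (a1 - a2)) := by
      simp only [pvDirection]; ring
    have e3 : pvDirection (high, b1) (low, a1) (low, a2) = -((high - low) * (a1 - a2)) := by
      simp only [pvDirection]; ring
    have e4 : pvDirection (high, b1) (low, a1) (high, b2) = -((high - low) * (b1 - b2)) := by
      simp only [pvDirection]; ring
    rw [e1, e2, e3, e4, pvOnSegment_true_iff, pvOnSegment_true_iff, pvOnSegment_true_iff, pvOnSegment_true_iff]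
    dsimp only
    by_cases hw : low = high
    · have ha := h1 hw; have hb := h2 hw
      subst hw; subst ha; subst hb
      constructor
      · rintro (⟨hA, -⟩ | ⟨-, hOS⟩ | ⟨-, hOS⟩ | ⟨-, hOS⟩ | ⟨-, hOS⟩)
        · exfalso; rcases hA with ⟨hp, hq⟩ | ⟨hp, hq⟩ <;> (ring_nf at hp; omega)
        all_goals (rw [(by omega : a1 - a2 = 0), zero_mul])
      · intro hP
        have key : a1 - a2 = 0 := by nlinarith [sq_nonneg (a1 - a2)]
        refine Or.inr (Or.inl ⟨by ring, ?_⟩)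
        omega
    · have hwne : high - low ≠ 0 := by omega
      constructor
      · rintro (⟨⟨hp, hq⟩ | ⟨hp, hq⟩, -⟩ | ⟨hd, -⟩ | ⟨hd, -⟩ | ⟨hd, -⟩ | ⟨hd, -⟩)
        · nlinarith [mul_pos hp (neg_pos.mpr hq), sq_nonneg (high - low)]
        · nlinarith [mul_pos (neg_pos.mpr hp) hq, sq_nonneg (high - low)]
        · have h0 : (high - low) * (b1 - b2) = 0 := by linarith [hd]
          rcases mul_eq_zero.mp h0 with h | h
          · exact absurd h hwne
          · rw [h, mul_zero]
        · have h0 : (high - low) * (a1 - a2) = 0 := by linarith [hd]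
          rcases mul_eq_zero.mp h0 with h | h
          · exact absurd h hwne
          · rw [h, zero_mul]
        · have h0 : (high - low) * (a1 - a2) = 0 := by linarith [hd]
          rcases mul_eq_zero.mp h0 with h | h
          · exact absurd h hwne
          · rw [h, zero_mul]
        · have h0 : (high - low) * (b1 - b2) = 0 := by linarith [hd]
          rcases mul_eq_zero.mp h0 with h | h
          · exact absurd h hwne
          · rw [h, mul_zero]
      · intro hP
        rcases lt_trichotomy (a1 - a2) 0 with hu | hu | hu
        · rcases lt_trichotomy (b1 - b2) 0 with hv | hv | hv
          · exact absurd hP (not_le.mpr (mul_pos_of_neg_of_neg hu hv))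
          refine Or.inr (Or.inl ⟨?_, ?_⟩)
          · rw [(by omega : (b1 - b2) = 0)]; ring
          · omega
          rcases lt_trichotomy (high - low) 0 with hw1 | hw1 | hw1
          · -- w < 0
            have hX1 := mul_neg_of_neg_of_pos hw1 hv
            have hX2 := mul_pos_of_neg_of_neg hw1 hu
            have hX3 := mul_pos_of_neg_of_neg hw1 hu
            have hX4 := mul_neg_of_neg_of_pos hw1 hv
            exact Or.inl ⟨Or.inl ⟨by linarith [hX1], by linarith [hX2]⟩, Or.inr ⟨by linarith [hX3], by linarith [hX4]⟩⟩
          · exact absurd hw1 hwne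
          · -- w > 0
            have hX1 := mul_pos hw1 hv
            have hX2 := mul_neg_of_pos_of_neg hw1 hu
            have hX3 := mul_neg_of_pos_of_neg hw1 hu
            have hX4 := mul_pos hw1 hv
            exact Or.inl ⟨Or.inr ⟨by linarith [hX1], by linarith [hX2]⟩, Or.inl ⟨by linarith [hX3], by linarith [hX4]⟩⟩
        refine Or.inr (Or.inr (Or.inl ⟨?_, ?_⟩))
        · rw [(by omega : (a1 - a2) = 0)]; ring
        · omega
        · rcases lt_trichotomy (b1 - b2) 0 with hv | hv | hv
          rcases lt_trichotomy (high - low) 0 with hw1 | hw1 | hw1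
          · -- w < 0
            have hX1 := mul_pos_of_neg_of_neg hw1 hv
            have hX2 := mul_neg_of_neg_of_pos hw1 hu
            have hX3 := mul_neg_of_neg_of_pos hw1 hu
            have hX4 := mul_pos_of_neg_of_neg hw1 hv
            exact Or.inl ⟨Or.inr ⟨by linarith [hX1], by linarith [hX2]⟩, Or.inl ⟨by linarith [hX3], by linarith [hX4]⟩⟩
          · exact absurd hw1 hwne
          · -- w > 0
            have hX1 := mul_neg_of_pos_of_neg hw1 hv
            have hX2 := mul_pos hw1 hu
            have hX3 := mul_pos hw1 hu
            have hX4 := mul_neg_of_pos_of_neg hw1 hv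
            exact Or.inl ⟨Or.inl ⟨by linarith [hX1], by linarith [hX2]⟩, Or.inr ⟨by linarith [hX3], by linarith [hX4]⟩⟩
          refine Or.inr (Or.inl ⟨?_, ?_⟩)
          · rw [(by omega : (b1 - b2) = 0)]; ring
          · omega
          · exact absurd hP (not_le.mpr (mul_pos hu hv))
  · rw [pvSegInt_true_iff]
    have e1 : pvDirection (high, b2) (low, a2) (low, a1) = ((high - low) * (a1 - a2)) := by
      simp only [pvDirection]; ring
    have e2 : pvDirection (high, b2) (low, a2) (high, b1) = ((high - low) * (b1 - b2)) := by
      simp only [pvDirection]; ring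
    have e3 : pvDirection (low, a1) (high, b1) (high, b2) = ((high - low) * (b1 - b2)) := by
      simp only [pvDirection]; ring
    have e4 : pvDirection (low, a1) (high, b1) (low, a2) = ((high - low) * (a1 - a2)) := by
      simp only [pvDirection]; ring
    rw [e1, e2, e3, e4, pvOnSegment_true_iff, pvOnSegment_true_iff, pvOnSegment_true_iff, pvOnSegment_true_iff]
    dsimp only
    by_cases hw : low = high
    · have ha := h1 hw; have hb := h2 hw
      subst hw; subst ha; subst hb
      constructor
      · rintro (⟨hA, -⟩ | ⟨-, hOS⟩ | ⟨-, hOS⟩ | ⟨-, hOS⟩ | ⟨-, hOS⟩)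
        · exfalso; rcases hA with ⟨hp, hq⟩ | ⟨hp, hq⟩ <;> (ring_nf at hp; omega)
        all_goals (rw [(by omega : a1 - a2 = 0), zero_mul])
      · intro hP
        have key : a1 - a2 = 0 := by nlinarith [sq_nonneg (a1 - a2)]
        refine Or.inr (Or.inl ⟨by ring, ?_⟩)
        omega
    · have hwne : high - low ≠ 0 := by omega
      constructor
      · rintro (⟨⟨hp, hq⟩ | ⟨hp, hq⟩, -⟩ | ⟨hd, -⟩ | ⟨hd, -⟩ | ⟨hd, -⟩ | ⟨hd, -⟩)
        · nlinarith [mul_pos hp (neg_pos.mpr hq), sq_nonneg (high - low)]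
        · nlinarith [mul_pos (neg_pos.mpr hp) hq, sq_nonneg (high - low)]
        · have h0 : (high - low) * (a1 - a2) = 0 := by linarith [hd]
          rcases mul_eq_zero.mp h0 with h | h
          · exact absurd h hwne
          · rw [h, zero_mul]
        · have h0 : (high - low) * (b1 - b2) = 0 := by linarith [hd]
          rcases mul_eq_zero.mp h0 with h | h
          · exact absurd h hwne
          · rw [h, mul_zero]
        · have h0 : (high - low) * (b1 - b2) = 0 := by linarith [hd]
          rcases mul_eq_zero.mp h0 with h | h
          · exact absurd h hwne
          · rw [h, mul_zero]
        · have h0 : (high - low) * (a1 - a2) = 0 := by linarith [hd]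
          rcases mul_eq_zero.mp h0 with h | h
          · exact absurd h hwne
          · rw [h, zero_mul]
      · intro hP
        rcases lt_trichotomy (a1 - a2) 0 with hu | hu | hu
        · rcases lt_trichotomy (b1 - b2) 0 with hv | hv | hv
          · exact absurd hP (not_le.mpr (mul_pos_of_neg_of_neg hu hv))
          refine Or.inr (Or.inr (Or.inl ⟨?_, ?_⟩))
          · rw [(by omega : (b1 - b2) = 0)]; ring
          · omega
          rcases lt_trichotomy (high - low) 0 with hw1 | hw1 | hw1
          · -- w < 0
            have hX1 := mul_pos_of_neg_of_neg hw1 hu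
            have hX2 := mul_neg_of_neg_of_pos hw1 hv
            have hX3 := mul_neg_of_neg_of_pos hw1 hv
            have hX4 := mul_pos_of_neg_of_neg hw1 hu
            exact Or.inl ⟨Or.inl ⟨by linarith [hX1], by linarith [hX2]⟩, Or.inr ⟨by linarith [hX3], by linarith [hX4]⟩⟩
          · exact absurd hw1 hwne
          · -- w > 0
            have hX1 := mul_neg_of_pos_of_neg hw1 hu
            have hX2 := mul_pos hw1 hv
            have hX3 := mul_pos hw1 hv
            have hX4 := mul_neg_of_pos_of_neg hw1 hu
            exact Or.inl ⟨Or.inr ⟨by linarith [hX1], by linarith [hX2]⟩, Or.inl ⟨by linarith [hX3], by linarith [hX4]⟩⟩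
        refine Or.inr (Or.inl ⟨?_, ?_⟩)
        · rw [(by omega : (a1 - a2) = 0)]; ring
        · omega
        · rcases lt_trichotomy (b1 - b2) 0 with hv | hv | hv
          rcases lt_trichotomy (high - low) 0 with hw1 | hw1 | hw1
          · -- w < 0
            have hX1 := mul_neg_of_neg_of_pos hw1 hu
            have hX2 := mul_pos_of_neg_of_neg hw1 hv
            have hX3 := mul_pos_of_neg_of_neg hw1 hv
            have hX4 := mul_neg_of_neg_of_pos hw1 hu
            exact Or.inl ⟨Or.inr ⟨by linarith [hX1], by linarith [hX2]⟩, Or.inl ⟨by linarith [hX3], by linarith [hX4]⟩⟩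
          · exact absurd hw1 hwne
          · -- w > 0
            have hX1 := mul_pos hw1 hu
            have hX2 := mul_neg_of_pos_of_neg hw1 hv
            have hX3 := mul_neg_of_pos_of_neg hw1 hv
            have hX4 := mul_pos hw1 hu
            exact Or.inl ⟨Or.inl ⟨by linarith [hX1], by linarith [hX2]⟩, Or.inr ⟨by linarith [hX3], by linarith [hX4]⟩⟩
          refine Or.inr (Or.inr (Or.inl ⟨?_, ?_⟩))
          · rw [(by omega : (b1 - b2) = 0)]; ring
          · omega
          · exact absurd hP (not_le.mpr (mul_pos hu hv))
  · rw [pvSegInt_true_iff]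
    have e1 : pvDirection (low, a2) (high, b2) (low, a1) = -((high - low) * (a1 - a2)) := by
      simp only [pvDirection]; ring
    have e2 : pvDirection (low, a2) (high, b2) (high, b1) = -((high - low) * (b1 - b2)) := by
      simp only [pvDirection]; ring
    have e3 : pvDirection (low, a1) (high, b1) (low, a2) = ((high - low) * (a1 - a2)) := by
      simp only [pvDirection]; ring
    have e4 : pvDirection (low, a1) (high, b1) (high, b2) = ((high - low) * (b1 - b2)) := by
      simp only [pvDirection]; ring
    rw [e1, e2, e3, e4, pvOnSegment_true_iff, pvOnSegment_true_iff, pvOnSegment_true_iff, pvOnSegment_true_iff]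
    dsimp only
    by_cases hw : low = high
    · have ha := h1 hw; have hb := h2 hw
      subst hw; subst ha; subst hb
      constructor
      · rintro (⟨hA, -⟩ | ⟨-, hOS⟩ | ⟨-, hOS⟩ | ⟨-, hOS⟩ | ⟨-, hOS⟩)
        · exfalso; rcases hA with ⟨hp, hq⟩ | ⟨hp, hq⟩ <;> (ring_nf at hp; omega)
        all_goals (rw [(by omega : a1 - a2 = 0), zero_mul])
      · intro hP
        have key : a1 - a2 = 0 := by nlinarith [sq_nonneg (a1 - a2)]
        refine Or.inr (Or.inl ⟨by ring, ?_⟩)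
        omega
    · have hwne : high - low ≠ 0 := by omega
      constructor
      · rintro (⟨⟨hp, hq⟩ | ⟨hp, hq⟩, -⟩ | ⟨hd, -⟩ | ⟨hd, -⟩ | ⟨hd, -⟩ | ⟨hd, -⟩)
        · nlinarith [mul_pos hp (neg_pos.mpr hq), sq_nonneg (high - low)]
        · nlinarith [mul_pos (neg_pos.mpr hp) hq, sq_nonneg (high - low)]
        · have h0 : (high - low) * (a1 - a2) = 0 := by linarith [hd]
          rcases mul_eq_zero.mp h0 with h | h
          · exact absurd h hwne
          · rw [h, zero_mul]
        · have h0 : (high - low) * (b1 - b2) = 0 := by linarith [hd]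
          rcases mul_eq_zero.mp h0 with h | h
          · exact absurd h hwne
          · rw [h, mul_zero]
        · have h0 : (high - low) * (a1 - a2) = 0 := by linarith [hd]
          rcases mul_eq_zero.mp h0 with h | h
          · exact absurd h hwne
          · rw [h, zero_mul]
        · have h0 : (high - low) * (b1 - b2) = 0 := by linarith [hd]
          rcases mul_eq_zero.mp h0 with h | h
          · exact absurd h hwne
          · rw [h, mul_zero]
      · intro hP
        rcases lt_trichotomy (a1 - a2) 0 with hu | hu | hu
        · rcases lt_trichotomy (b1 - b2) 0 with hv | hv | hv
          · exact absurd hP (not_le.mpr (mul_pos_of_neg_of_neg hu hv))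
          refine Or.inr (Or.inr (Or.inl ⟨?_, ?_⟩))
          · rw [(by omega : (b1 - b2) = 0)]; ring
          · omega
          rcases lt_trichotomy (high - low) 0 with hw1 | hw1 | hw1
          · -- w < 0
            have hX1 := mul_pos_of_neg_of_neg hw1 hu
            have hX2 := mul_neg_of_neg_of_pos hw1 hv
            have hX3 := mul_pos_of_neg_of_neg hw1 hu
            have hX4 := mul_neg_of_neg_of_pos hw1 hv
            exact Or.inl ⟨Or.inr ⟨by linarith [hX1], by linarith [hX2]⟩, Or.inl ⟨by linarith [hX3], by linarith [hX4]⟩⟩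
          · exact absurd hw1 hwne
          · -- w > 0
            have hX1 := mul_neg_of_pos_of_neg hw1 hu
            have hX2 := mul_pos hw1 hv
            have hX3 := mul_neg_of_pos_of_neg hw1 hu
            have hX4 := mul_pos hw1 hv
            exact Or.inl ⟨Or.inl ⟨by linarith [hX1], by linarith [hX2]⟩, Or.inr ⟨by linarith [hX3], by linarith [hX4]⟩⟩
        refine Or.inr (Or.inl ⟨?_, ?_⟩)
        · rw [(by omega : (a1 - a2) = 0)]; ring
        · omega
        · rcases lt_trichotomy (b1 - b2) 0 with hv | hv | hv
          rcases lt_trichotomy (high - low) 0 with hw1 | hw1 | hw1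
          · -- w < 0
            have hX1 := mul_neg_of_neg_of_pos hw1 hu
            have hX2 := mul_pos_of_neg_of_neg hw1 hv
            have hX3 := mul_neg_of_neg_of_pos hw1 hu
            have hX4 := mul_pos_of_neg_of_neg hw1 hv
            exact Or.inl ⟨Or.inl ⟨by linarith [hX1], by linarith [hX2]⟩, Or.inr ⟨by linarith [hX3], by linarith [hX4]⟩⟩
          · exact absurd hw1 hwne
          · -- w > 0
            have hX1 := mul_pos hw1 hu
            have hX2 := mul_neg_of_pos_of_neg hw1 hv
            have hX3 := mul_pos hw1 hu
            have hX4 := mul_neg_of_pos_of_neg hw1 hv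
            exact Or.inl ⟨Or.inr ⟨by linarith [hX1], by linarith [hX2]⟩, Or.inl ⟨by linarith [hX3], by linarith [hX4]⟩⟩
          refine Or.inr (Or.inr (Or.inl ⟨?_, ?_⟩))
          · rw [(by omega : (b1 - b2) = 0)]; ring
          · omega
          · exact absurd hP (not_le.mpr (mul_pos hu hv))

theorem ite_ite_or {p q : Prop} [Decidable p] [Decidable q] (x y : Int) :
    (if p then x else if q then x else y) = if p ∨ q then x else y := by
  by_cases hp : p <;> by_cases hq : q <;> simp [hp, hq]

theorem mark_fold (cond : Int → Bool) (act : List Int) (ov : List Int) (iN : Nat)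
    (hi : iN < ov.length)
    (hact : ∀ j ∈ act, ∃ l : Nat, j = (l : Int) ∧ l < ov.length) :
    (act.foldl (fun ov j => if cond j then
        PySem.List.pySetD (PySem.List.pySetD ov (iN : Int) 1) j 1 else ov) ov).length = ov.length ∧
    ∀ (m : Nat), m < ov.length →
      (act.foldl (fun ov j => if cond j then
          PySem.List.pySetD (PySem.List.pySetD ov (iN : Int) 1) j 1 else ov) ov).getD m 0 =
        if ((∃ j ∈ act, cond j = true) ∧ m = iN) ∨ ((m : Int) ∈ act ∧ cond (m : Int) = true)
        then 1 else ov.getD m 0 := by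
  induction act generalizing ov with
  | nil => simp
  | cons j act ih =>
    obtain ⟨l, rfl, hl⟩ := hact j (List.mem_cons_self)
    by_cases hc : cond (l : Int) = true
    · have hlen1 : (PySem.List.pySetD (PySem.List.pySetD ov (iN : Int) 1) (l : Int) 1).length = ov.length := by
        rw [PySem.List.pySetD_natCast, PySem.List.pySetD_natCast]
        simp
      have hact' : ∀ x ∈ act, ∃ l' : Nat, x = (l' : Int) ∧ l' < (PySem.List.pySetD (PySem.List.pySetD ov (iN : Int) 1) (l : Int) 1).length := by
        rw [hlen1]; intro x hx; exact hact x (List.mem_cons_of_mem _ hx)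
      obtain ⟨ihl, ihg⟩ := ih (PySem.List.pySetD (PySem.List.pySetD ov (iN : Int) 1) (l : Int) 1)
        (by rw [hlen1]; exact hi) hact'
      rw [hlen1] at ihl ihg
      constructor
      · simpa [hc] using ihl
      · intro m hm
        have hgd : (PySem.List.pySetD (PySem.List.pySetD ov (iN : Int) 1) (l : Int) 1).getD m 0 =
            if m = iN ∨ m = l then 1 else ov.getD m 0 := by
          rw [PySem.List.pySetD_natCast, PySem.List.pySetD_natCast]
          rw [List.getD_eq_getElem?_getD, List.getD_eq_getElem?_getD]
          rw [List.getElem?_set, List.getElem?_set]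
          simp only [List.length_set]
          by_cases h1 : l = m
          · subst h1
            rw [if_pos rfl, if_pos hl, if_pos (Or.inr rfl)]
            rfl
          · rw [if_neg h1]
            by_cases h2 : iN = m
            · subst h2
              rw [if_pos rfl, if_pos hi, if_pos (Or.inl rfl)]
              rfl
            · rw [if_neg h2, if_neg (by tauto : ¬ (m = iN ∨ m = l))]
        simp only [List.foldl_cons, hc, if_true]
        rw [ihg m hm, hgd, ite_ite_or]
        refine if_congr ?_ rfl rfl
        simp only [List.mem_cons]
        constructor
        · rintro ((⟨⟨j, hj, hcj⟩, rfl⟩ | ⟨hmem, hcm⟩) | rfl | rfl)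
          · exact Or.inl ⟨⟨j, Or.inr hj, hcj⟩, rfl⟩
          · exact Or.inr ⟨Or.inr hmem, hcm⟩
          · exact Or.inl ⟨⟨(l : Int), Or.inl rfl, hc⟩, rfl⟩
          · exact Or.inr ⟨Or.inl rfl, hc⟩
        · rintro (⟨⟨j, hj, hcj⟩, rfl⟩ | ⟨hmem, hcm⟩)
          · rcases hj with rfl | hj
            · exact Or.inr (Or.inl rfl)
            · exact Or.inl (Or.inl ⟨⟨j, hj, hcj⟩, rfl⟩)
          · rcases hmem with he | hmem
            · refine Or.inr (Or.inr (by exact_mod_cast he))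
            · exact Or.inl (Or.inr ⟨hmem, hcm⟩)
    · simp only [Bool.not_eq_true] at hc
      simp only [List.foldl_cons, hc, Bool.false_eq_true, if_false]
      obtain ⟨ihl, ihg⟩ := ih ov hi (fun x hx => hact x (List.mem_cons_of_mem _ hx))
      refine ⟨by simpa [hc] using ihl, ?_⟩
      intro m hm
      rw [ihg m hm]
      refine if_congr ?_ rfl rfl
      simp only [List.mem_cons]
      constructor
      · rintro (⟨⟨j, hj, hcj⟩, rfl⟩ | ⟨hmem, hcm⟩)
        · exact Or.inl ⟨⟨j, Or.inr hj, hcj⟩, rfl⟩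
        · exact Or.inr ⟨Or.inr hmem, hcm⟩
      · rintro (⟨⟨j, hj, hcj⟩, rfl⟩ | ⟨hmem, hcm⟩)
        · rcases hj with rfl | hj
          · rw [hc] at hcj; exact absurd hcj (by simp)
          · exact Or.inl ⟨⟨j, hj, hcj⟩, rfl⟩
        · rcases hmem with he | hmem
          · rw [he, hc] at hcm; exact absurd hcm (by simp)
          · exact Or.inr ⟨hmem, hcm⟩


theorem segInt_char (lines : List (Int × Int)) (low high : Int) (k l : Nat) :
    pvSegInt (pvSeg lines low high k).1 (pvSeg lines low high k).2
             (pvSeg lines low high l).1 (pvSeg lines low high l).2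
      = decide (pvInter lines low high k l) := by
  have h := segInt_core low high (pvA lines low k) (pvA lines high k)
    (pvA lines low l) (pvA lines high l) (fun h => by rw [h]) (fun h => by rw [h])
  simpa [pvSeg, pvInter] using h

theorem segL_get (lines : List (Int × Int)) (low high : Int) (l : Nat) (hl : l < lines.length) :
    PySem.List.pyGetD (pvSegL lines low high) ((l : Nat) : Int) ((0, 0), (0, 0))
      = pvSeg lines low high l := by
  rw [PySem.List.pyGetD_natCast, pvSegL, List.getD_eq_getElem?_getD, List.getElem?_map]
  simp [List.getElem?_range, hl]

theorem not_head_mem_t {t r : List (Int × Int × Int)} {ev : Int × Int × Int}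
    (hnd : (t ++ ev :: r).Nodup) : ev ∉ t := by
  intro h
  rcases List.nodup_append.mp hnd with ⟨-, -, hdisj⟩
  exact hdisj ev h ev (List.mem_cons_self) rfl

theorem mem_t_of_lt {t r : List (Int × Int × Int)} {ev x : Int × Int × Int}
    (hp : (t ++ ev :: r).Pairwise pvLexLe) (hx : x ∈ t ++ ev :: r) (hlt : pvLexLtP x ev) :
    x ∈ t := by
  rcases List.mem_append.mp hx with h | h
  · exact h
  · exfalso
    rcases List.mem_cons.mp h with rfl | h
    · exact lexLtP_not_le hlt (Or.inr ⟨rfl, Or.inr ⟨rfl, le_refl _⟩⟩)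
    · rcases List.pairwise_append.mp hp with ⟨-, hpr, -⟩
      rcases List.pairwise_cons.mp hpr with ⟨hev, -⟩
      exact lexLtP_not_le hlt (hev x h)

theorem mem_r_of_gt {t r : List (Int × Int × Int)} {ev x : Int × Int × Int}
    (hp : (t ++ ev :: r).Pairwise pvLexLe) (hx : x ∈ t ++ ev :: r) (hgt : pvLexLtP ev x) :
    x ∈ r := by
  rcases List.mem_append.mp hx with h | h
  · exfalso
    rcases List.pairwise_append.mp hp with ⟨-, -, hcross⟩
    exact lexLtP_not_le hgt (hcross x h ev (List.mem_cons_self))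
  · rcases List.mem_cons.mp h with rfl | h
    · exact absurd (Or.inr ⟨rfl, Or.inr ⟨rfl, le_refl _⟩⟩) (fun hle => lexLtP_not_le hgt hle)
    · exact h

theorem tEv_not_le_sEv_of_inter (lines : List (Int × Int)) (low high : Int) (i l : Nat)
    (h : pvInter lines low high i l) :
    ¬ pvLexLe (pvTEv lines low high l) (pvSEv lines low high i) := by
  intro hle
  have hov := inter_overlap lines low high i l h
  unfold pvLexLe pvTEv pvSEv at hle
  simp only at hle
  omega

theorem sweep_inv (lines : List (Int × Int)) (low high : Int) :
    ∀ (r t : List (Int × Int × Int)) (active ov : List Int),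
    ((t ++ r).Pairwise pvLexLe) →
    ((t ++ r).Nodup) →
    (∀ x, x ∈ t ++ r ↔ ∃ k, k < lines.length ∧ (x = pvSEv lines low high k ∨ x = pvTEv lines low high k)) →
    (∀ x, x ∈ active ↔ ∃ k, k < lines.length ∧ x = (k : Int) ∧ pvSEv lines low high k ∈ t ∧ pvTEv lines low high k ∈ r) →
    ov.length = lines.length →
    (∀ m, m < lines.length →
      ov.getD m 0 = if (∃ l, l < lines.length ∧ l ≠ m ∧ pvInter lines low high m l ∧ pvSEv lines low high l ∈ t ∧ pvSEv lines low high m ∈ t) then 1 else 0) →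
    (r.foldl (pvStep (pvSegL lines low high)) (active, ov)).2.length = lines.length ∧
    ∀ m, m < lines.length →
      (r.foldl (pvStep (pvSegL lines low high)) (active, ov)).2.getD m 0 =
        if (∃ l, l < lines.length ∧ l ≠ m ∧ pvInter lines low high m l ∧ pvSEv lines low high l ∈ t ++ r ∧ pvSEv lines low high m ∈ t ++ r) then 1 else 0 := by
  intro r
  induction r with
  | nil =>
    intro t active ov _ _ _ _ hlen hov
    simpa using ⟨hlen, hov⟩
  | cons ev r ih =>
    intro t active ov hp hnd hmem hact hlen hov
    obtain ⟨i, hi, hevi⟩ := (hmem ev).mp (by simp)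
    rcases hevi with rfl | rfl
    · -- START event of line i
      have hevnt : pvSEv lines low high i ∉ t := not_head_mem_t hnd
      have hnotin : ((i : Nat) : Int) ∉ active := by
        intro hx
        obtain ⟨k, hk, hkx, hst, -⟩ := (hact _).mp hx
        have hik : i = k := by exact_mod_cast hkx
        subst hik
        exact hevnt hst
      have hcontf : PySem.Set.contains active ((i : Nat) : Int) = false := by
        rw [← Bool.not_eq_true]
        intro hc
        simp only [PySem.Set.contains, List.contains_iff_exists_mem_beq] at hc
        obtain ⟨x, hx, hbeq⟩ := hc
        exact hnotin ((eq_of_beq hbeq) ▸ hx)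
      have hstep : pvStep (pvSegL lines low high) (active, ov) (pvSEv lines low high i)
          = (active ++ [((i : Nat) : Int)],
             active.foldl (fun ov j =>
               if (fun j => pvSegInt
                    (PySem.List.pyGetD (pvSegL lines low high) ((i : Nat) : Int) ((0, 0), (0, 0))).1
                    (PySem.List.pyGetD (pvSegL lines low high) ((i : Nat) : Int) ((0, 0), (0, 0))).2
                    (PySem.List.pyGetD (pvSegL lines low high) j ((0, 0), (0, 0))).1
                    (PySem.List.pyGetD (pvSegL lines low high) j ((0, 0), (0, 0))).2) j
               then PySem.List.pySetD (PySem.List.pySetD ov ((i : Nat) : Int) 1) j 1 else ov) ov) := by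
        simp only [pvStep, PySem.Set.add, PySem.Set.contains, pvSEv]
        norm_num
        exact hnotin
      have hcond : ∀ l : Nat, l < lines.length →
          (pvSegInt
            (PySem.List.pyGetD (pvSegL lines low high) ((i : Nat) : Int) ((0, 0), (0, 0))).1
            (PySem.List.pyGetD (pvSegL lines low high) ((i : Nat) : Int) ((0, 0), (0, 0))).2
            (PySem.List.pyGetD (pvSegL lines low high) ((l : Nat) : Int) ((0, 0), (0, 0))).1
            (PySem.List.pyGetD (pvSegL lines low high) ((l : Nat) : Int) ((0, 0), (0, 0))).2)
          = decide (pvInter lines low high i l) := by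
        intro l hl
        rw [segL_get lines low high i hi, segL_get lines low high l hl, segInt_char]
      obtain ⟨hlenN, hgetN⟩ := mark_fold
        (fun j => pvSegInt
          (PySem.List.pyGetD (pvSegL lines low high) ((i : Nat) : Int) ((0, 0), (0, 0))).1
          (PySem.List.pyGetD (pvSegL lines low high) ((i : Nat) : Int) ((0, 0), (0, 0))).2
          (PySem.List.pyGetD (pvSegL lines low high) j ((0, 0), (0, 0))).1
          (PySem.List.pyGetD (pvSegL lines low high) j ((0, 0), (0, 0))).2)
        active ov i (by omega)
        (by
          intro j hj
          obtain ⟨k, hk, rfl, -, -⟩ := (hact _).mp hj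
          exact ⟨k, rfl, by omega⟩)
      have heq : (t ++ [pvSEv lines low high i]) ++ r = t ++ pvSEv lines low high i :: r := by simp
      have htEr : pvTEv lines low high i ∈ r :=
        mem_r_of_gt hp ((hmem _).mpr ⟨i, hi, Or.inr rfl⟩) (sEv_lt_tEv lines low high i)
      have hact' : ∀ x, x ∈ active ++ [((i : Nat) : Int)] ↔
          ∃ k, k < lines.length ∧ x = (k : Int) ∧ pvSEv lines low high k ∈ t ++ [pvSEv lines low high i] ∧ pvTEv lines low high k ∈ r := by
        intro x
        rw [List.mem_append]
        constructor
        · rintro (hx | hx)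
          · obtain ⟨k, hk, rfl, hst, htv⟩ := (hact _).mp hx
            refine ⟨k, hk, rfl, List.mem_append_left _ hst, ?_⟩
            rcases List.mem_cons.mp htv with h | h
            · exact absurd h.symm (sEv_ne_tEv lines low high i k)
            · exact h
          · refine ⟨i, hi, by simpa using hx, List.mem_append_right _ (by simp), htEr⟩
        · rintro ⟨k, hk, rfl, hst, htv⟩
          rcases List.mem_append.mp hst with h | h
          · exact Or.inl ((hact _).mpr ⟨k, hk, rfl, h, List.mem_cons_of_mem _ htv⟩)
          · have : k = i := sEv_inj lines low high k i (by simpa using h)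
            subst this
            simp
      have hov' : ∀ m, m < lines.length →
          (active.foldl (fun ov j =>
               if (fun j => pvSegInt
                    (PySem.List.pyGetD (pvSegL lines low high) ((i : Nat) : Int) ((0, 0), (0, 0))).1
                    (PySem.List.pyGetD (pvSegL lines low high) ((i : Nat) : Int) ((0, 0), (0, 0))).2
                    (PySem.List.pyGetD (pvSegL lines low high) j ((0, 0), (0, 0))).1
                    (PySem.List.pyGetD (pvSegL lines low high) j ((0, 0), (0, 0))).2) j
               then PySem.List.pySetD (PySem.List.pySetD ov ((i : Nat) : Int) 1) j 1 else ov) ov).getD m 0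
            = if (∃ l, l < lines.length ∧ l ≠ m ∧ pvInter lines low high m l ∧ pvSEv lines low high l ∈ t ++ [pvSEv lines low high i] ∧ pvSEv lines low high m ∈ t ++ [pvSEv lines low high i]) then 1 else 0 := by
        intro m hm
        rw [hgetN m (by omega), hov m hm, ite_ite_or]
        refine if_congr ?_ rfl rfl
        constructor
        · rintro ((⟨⟨j, hj, hcj⟩, rfl⟩ | ⟨hmA, hcm⟩) | ⟨l, hl, hlm, hint, h1, h2⟩)
          · -- m = i, marked via some active j (the rfl pattern eliminated i)
            obtain ⟨l, hl, rfl, hslt, htlr⟩ := (hact _).mp hj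
            rw [hcond l hl] at hcj
            have hint : pvInter lines low high m l := of_decide_eq_true hcj
            have hlni : l ≠ m := fun h => hevnt (h ▸ hslt)
            exact ⟨l, hl, hlni, hint,
              List.mem_append_left _ hslt, List.mem_append_right _ (by simp)⟩
          · -- m itself active and intersecting i
            obtain ⟨k, hk, hkm, hst, htv⟩ := (hact _).mp hmA
            have hkm' : m = k := by exact_mod_cast hkm
            subst hkm'
            rw [hcond m hk] at hcm
            have hint : pvInter lines low high m i := (inter_comm lines low high i m).mp (of_decide_eq_true hcm)
            have hmni : i ≠ m := fun h => hevnt (h ▸ hst)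
            exact ⟨i, hi, hmni, hint, List.mem_append_right _ (by simp), List.mem_append_left _ hst⟩
          · exact ⟨l, hl, hlm, hint, List.mem_append_left _ h1, List.mem_append_left _ h2⟩
        · rintro ⟨l, hl, hlm, hint, h1, h2⟩
          rcases List.mem_append.mp h2 with hm2 | hm2
          · rcases List.mem_append.mp h1 with hl1 | hl1
            · exact Or.inr ⟨l, hl, hlm, hint, hl1, hm2⟩
            · -- l = i : m is active and intersects i
              have hli : l = i := sEv_inj lines low high l i (by simpa using hl1)
              subst hli
              have hintlm : pvInter lines low high l m := (inter_comm lines low high m l).mp hint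
              have htmr : pvTEv lines low high m ∈ pvSEv lines low high l :: r := by
                have hmm : pvTEv lines low high m ∈ t ++ pvSEv lines low high l :: r :=
                  (hmem _).mpr ⟨m, hm, Or.inr rfl⟩
                rcases List.mem_append.mp hmm with h | h
                · exfalso
                  rcases List.pairwise_append.mp hp with ⟨-, -, hcross⟩
                  exact tEv_not_le_sEv_of_inter lines low high l m hintlm
                    (hcross _ h _ (List.mem_cons_self))
                · exact h
              refine Or.inl (Or.inr ⟨(hact _).mpr ⟨m, hm, rfl, hm2, htmr⟩, ?_⟩)
              · rw [hcond m hm]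
                exact decide_eq_true ((inter_comm lines low high m l).mp hint)
          · -- m = i : marked through partner l in active
            have hmi : m = i := sEv_inj lines low high m i (by simpa using hm2)
            subst hmi
            have hsl1 : pvSEv lines low high l ∈ t := by
              rcases List.mem_append.mp h1 with h | h
              · exact h
              · exact absurd (sEv_inj lines low high l m (by simpa using h))
                  (fun hh => hlm hh)
            have hintml : pvInter lines low high m l := hint
            have htlr2 : pvTEv lines low high l ∈ pvSEv lines low high m :: r := by
              have hmm : pvTEv lines low high l ∈ t ++ pvSEv lines low high m :: r :=
                (hmem _).mpr ⟨l, hl, Or.inr rfl⟩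
              rcases List.mem_append.mp hmm with h | h
              · exfalso
                rcases List.pairwise_append.mp hp with ⟨-, -, hcross⟩
                exact tEv_not_le_sEv_of_inter lines low high m l hintml
                  (hcross _ h _ (List.mem_cons_self))
              · exact h
            refine Or.inl (Or.inl ⟨⟨((l : Nat) : Int), (hact _).mpr ⟨l, hl, rfl, hsl1, htlr2⟩, ?_⟩, rfl⟩)
            rw [hcond l hl]
            exact decide_eq_true hint
      obtain ⟨hl2, hg2⟩ := ih (t ++ [pvSEv lines low high i])
        (active ++ [((i : Nat) : Int)]) _
        (by rw [heq]; exact hp) (by rw [heq]; exact hnd)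
        (by intro x; rw [heq]; exact hmem x) hact' (by rw [hlenN]; exact hlen) hov'
      constructor
      · simpa only [List.foldl_cons, hstep] using hl2
      · intro m hm
        have := hg2 m hm
        rw [heq] at this
        simpa only [List.foldl_cons, hstep] using this
    · -- STOP event of line i
      have hsEt : pvSEv lines low high i ∈ t :=
        mem_t_of_lt hp ((hmem _).mpr ⟨i, hi, Or.inl rfl⟩) (sEv_lt_tEv lines low high i)
      have hiact : (i : Int) ∈ active :=
        (hact _).mpr ⟨i, hi, rfl, hsEt, List.mem_cons_self⟩
      have hcont : PySem.Set.contains active ((i : Nat) : Int) = true := by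
        simp [PySem.Set.contains, List.contains_iff_exists_mem_beq]
        exact hiact
      have hstep : pvStep (pvSegL lines low high) (active, ov) (pvTEv lines low high i)
          = (active.filter (fun y => !y == ((i : Nat) : Int)), ov) := by
        simp only [pvStep, pvTEv]
        norm_num [PySem.Set.remove?, PySem.Set.discard, hcont]
        rw [if_pos hiact]
        rfl
      have heq : (t ++ [pvTEv lines low high i]) ++ r = t ++ pvTEv lines low high i :: r := by simp
      have hact' : ∀ x, x ∈ active.filter (fun y => !y == ((i : Nat) : Int)) ↔
          ∃ k, k < lines.length ∧ x = (k : Int) ∧ pvSEv lines low high k ∈ t ++ [pvTEv lines low high i] ∧ pvTEv lines low high k ∈ r := by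
        intro x
        rw [List.mem_filter]
        constructor
        · rintro ⟨hx, hne⟩
          obtain ⟨k, hk, rfl, hst, htv⟩ := (hact x).mp hx
          have hki : k ≠ i := by
            intro h; subst h
            simp at hne
          refine ⟨k, hk, rfl, List.mem_append_left _ hst, ?_⟩
          rcases List.mem_cons.mp htv with h | h
          · exact absurd (tEv_inj lines low high k i h) hki
          · exact h
        · rintro ⟨k, hk, rfl, hst, htv⟩
          have hst' : pvSEv lines low high k ∈ t := by
            rcases List.mem_append.mp hst with h | h
            · exact h
            · rcases List.mem_cons.mp h with h | h
              · exact absurd h (sEv_ne_tEv lines low high k i)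
              · simp at h
          have hki : k ≠ i := by
            intro h; subst h
            have : (pvTEv lines low high k :: r).Nodup := (List.nodup_append.mp hnd).2.1
            exact (List.nodup_cons.mp this).1 htv
          refine ⟨(hact _).mpr ⟨k, hk, rfl, hst', List.mem_cons_of_mem _ htv⟩, ?_⟩
          simpa using fun h => hki (by exact_mod_cast h)
      have hov' : ∀ m, m < lines.length →
          ov.getD m 0 = if (∃ l, l < lines.length ∧ l ≠ m ∧ pvInter lines low high m l ∧ pvSEv lines low high l ∈ t ++ [pvTEv lines low high i] ∧ pvSEv lines low high m ∈ t ++ [pvTEv lines low high i]) then 1 else 0 := by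
        intro m hm
        rw [hov m hm]
        refine if_congr ?_ rfl rfl
        constructor
        · rintro ⟨l, hl, hne, hint, h1, h2⟩
          exact ⟨l, hl, hne, hint, List.mem_append_left _ h1, List.mem_append_left _ h2⟩
        · rintro ⟨l, hl, hne, hint, h1, h2⟩
          have g1 : pvSEv lines low high l ∈ t := by
            rcases List.mem_append.mp h1 with h | h
            · exact h
            · exact absurd (by simpa using h) (sEv_ne_tEv lines low high l i)
          have g2 : pvSEv lines low high m ∈ t := by
            rcases List.mem_append.mp h2 with h | h
            · exact h
            · exact absurd (by simpa using h) (sEv_ne_tEv lines low high m i)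
          exact ⟨l, hl, hne, hint, g1, g2⟩
      obtain ⟨hl2, hg2⟩ := ih (t ++ [pvTEv lines low high i])
        (active.filter (fun y => !y == ((i : Nat) : Int))) ov
        (by rw [heq]; exact hp) (by rw [heq]; exact hnd)
        (by intro x; rw [heq]; exact hmem x) hact' hlen hov'
      constructor
      · simpa only [List.foldl_cons, hstep] using hl2
      · intro m hm
        have := hg2 m hm
        rw [heq] at this
        simpa only [List.foldl_cons, hstep] using this


-- ==== build phase closed form ====
def pvBSeg (low high : Int) (p : Int × (Int × Int)) : (Int × Int) × (Int × Int) :=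
  if pvF p.2.1 p.2.2 high < pvF p.2.1 p.2.2 low
  then ((high, pvF p.2.1 p.2.2 high), (low, pvF p.2.1 p.2.2 low))
  else ((low, pvF p.2.1 p.2.2 low), (high, pvF p.2.1 p.2.2 high))
def pvBEvs (low high : Int) (p : Int × (Int × Int)) : List (Int × Int × Int) :=
  [((pvBSeg low high p).1.2, -1, p.1), ((pvBSeg low high p).2.2, 1, p.1)]

theorem pvBuildStep_eq (low high : Int)
    (st : List ((Int × Int) × (Int × Int)) × List (Int × Int × Int)) (p : Int × (Int × Int)) :
    pvBuildStep low high st p = (st.1 ++ [pvBSeg low high p], st.2 ++ pvBEvs low high p) := rfl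

theorem build_aux (low high : Int) :
    ∀ (xs : List (Int × (Int × Int))) (s : List ((Int × Int) × (Int × Int)))
      (e : List (Int × Int × Int)),
      xs.foldl (pvBuildStep low high) (s, e)
        = (s ++ xs.map (pvBSeg low high), e ++ xs.flatMap (pvBEvs low high)) := by
  intro xs
  induction xs with
  | nil => intro s e; simp
  | cons p xs ih =>
    intro s e
    simp only [List.foldl_cons, pvBuildStep_eq]
    rw [ih]
    simp

theorem enumMap_eq_segL (lines : List (Int × Int)) (low high : Int) :
    (PySem.List.enumerate lines 0).map (pvBSeg low high) = pvSegL lines low high := by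
  rw [PySem.List.enumerate_eq_map_pyRange lines ((0 : Int), (0 : Int))]
  have hlen : PySem.List.len lines = ((lines.length : Nat) : Int) := by simp [PySem.List.len]
  rw [hlen, PySem.List.pyRange_zero_natCast, List.map_map, List.map_map, pvSegL]
  apply List.map_congr_left
  intro k _
  simp [Function.comp, pvBSeg, pvSeg, pvA, pvF, PySem.List.pyGetD_natCast]

theorem pvBEvs_eq (lines : List (Int × Int)) (low high : Int) (k : Nat) :
    pvBEvs low high ((k : Int), lines.getD k (0, 0))
      = [pvSEv lines low high k, pvTEv lines low high k] := by
  simp only [pvBEvs, pvBSeg, pvSEv, pvTEv, pvF, pvA]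
  split_ifs with h <;> simp [Prod.ext_iff, List.getD_eq_getElem?_getD] at h ⊢ <;> omega

theorem enumFlat_eq_evL (lines : List (Int × Int)) (low high : Int) :
    (PySem.List.enumerate lines 0).flatMap (pvBEvs low high) = pvEvL lines low high := by
  rw [PySem.List.enumerate_eq_map_pyRange lines ((0 : Int), (0 : Int))]
  have hlen : PySem.List.len lines = ((lines.length : Nat) : Int) := by simp [PySem.List.len]
  rw [hlen, PySem.List.pyRange_zero_natCast, List.map_map, List.flatMap_map, pvEvL]
  congr 1
  funext k
  simp only [Function.comp, PySem.List.pyGetD_natCast]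
  exact pvBEvs_eq lines low high k

theorem solve_unfold (lines : List (Int × Int)) (low high : Int) :
    solve lines low high =
      ((pvSortEv (pvEvL lines low high)).foldl (pvStep (pvSegL lines low high))
        (PySem.Set.empty, lines.map (fun _ => (0 : Int)))).2.sum := by
  unfold solve
  rw [build_aux, List.nil_append, List.nil_append, enumMap_eq_segL, enumFlat_eq_evL]

-- ==== sum of the marker array ====
theorem sum_map_ite (l : List Nat) (P : Nat → Prop) [DecidablePred P] :
    (l.map (fun m => if P m then (1 : Int) else 0)).sum
      = ((l.countP (fun m => decide (P m)) : Nat) : Int) := by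
  induction l with
  | nil => simp
  | cons a l ih =>
    by_cases h : P a <;> simp [List.countP_cons, h, ih] <;> push_cast <;> ring

theorem sum_char (ov : List Int) (n : Nat) (P : Nat → Prop) [DecidablePred P]
    (hlen : ov.length = n) (hc : ∀ m, m < n → ov.getD m 0 = if P m then 1 else 0) :
    ov.sum = (((List.range n).countP (fun m => decide (P m)) : Nat) : Int) := by
  have hov : ov = (List.range n).map (fun m => if P m then (1 : Int) else 0) := by
    apply List.ext_getElem (by simp [hlen])
    intro i h1 h2
    have h3 := hc i (by omega)
    rw [List.getD_eq_getElem?_getD, List.getElem?_eq_getElem h1] at h3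
    simpa using h3
  rw [hov, sum_map_ite]

-- ==== A's characterization ====
theorem solve_char (lines : List (Int × Int)) (low high : Int) :
    solve lines low high =
      (((List.range lines.length).countP
        (fun k => decide (∃ l, l < lines.length ∧ l ≠ k ∧ pvInter lines low high k l)) : Nat) : Int) := by
  rw [solve_unfold]
  have hperm := sortEv_perm (pvEvL lines low high)
  have hp : (([] : List (Int × Int × Int)) ++ pvSortEv (pvEvL lines low high)).Pairwise pvLexLe := by
    simpa using sortEv_pairwise (pvEvL lines low high)
  have hnd : (([] : List (Int × Int × Int)) ++ pvSortEv (pvEvL lines low high)).Nodup := by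
    simpa using hperm.nodup_iff.mpr (nodup_pvEvL lines low high)
  have hmem : ∀ x, x ∈ ([] : List (Int × Int × Int)) ++ pvSortEv (pvEvL lines low high) ↔
      ∃ k, k < lines.length ∧ (x = pvSEv lines low high k ∨ x = pvTEv lines low high k) := by
    intro x
    rw [List.nil_append, hperm.mem_iff]
    exact mem_pvEvL lines low high x
  have hact : ∀ x : Int, x ∈ (PySem.Set.empty : PySem.Set Int) ↔
      ∃ k, k < lines.length ∧ x = (k : Int) ∧ pvSEv lines low high k ∈ ([] : List (Int × Int × Int)) ∧
        pvTEv lines low high k ∈ pvSortEv (pvEvL lines low high) := by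
    intro x
    simp [PySem.Set.empty]
  have hlen : (lines.map (fun _ => (0 : Int))).length = lines.length := by simp
  have hov : ∀ m, m < lines.length →
      (lines.map (fun _ => (0 : Int))).getD m 0 =
        if (∃ l, l < lines.length ∧ l ≠ m ∧ pvInter lines low high m l ∧
            pvSEv lines low high l ∈ ([] : List (Int × Int × Int)) ∧
            pvSEv lines low high m ∈ ([] : List (Int × Int × Int))) then 1 else 0 := by
    intro m hm
    rw [if_neg (by simp)]
    rw [List.getD_eq_getElem?_getD, List.getElem?_map, List.getElem?_eq_getElem hm]
    rfl
  obtain ⟨hl2, hg2⟩ := sweep_inv lines low high (pvSortEv (pvEvL lines low high)) []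
    PySem.Set.empty (lines.map (fun _ => (0 : Int))) hp hnd hmem hact hlen hov
  apply sum_char _ lines.length _ hl2
  intro m hm
  rw [hg2 m hm]
  refine if_congr ?_ rfl rfl
  constructor
  · rintro ⟨l, hl, hlm, hint, -, -⟩
    exact ⟨l, hl, hlm, hint⟩
  · rintro ⟨l, hl, hlm, hint⟩
    exact ⟨l, hl, hlm, hint, (hmem _).mpr ⟨l, hl, Or.inl rfl⟩, (hmem _).mpr ⟨m, hm, Or.inl rfl⟩⟩

theorem countP_enumerate_zero {α : Type} (xs : List α) (p : Int × α → Bool) (d : α) :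
    (PySem.List.enumerate xs 0).countP p
      = (List.range xs.length).countP (fun (k : Nat) => p ((k : Int), xs.getD k d)) := by
  rw [PySem.List.enumerate_eq_map_pyRange xs d]
  have hlen : PySem.List.len xs = ((xs.length : Nat) : Int) := by simp [PySem.List.len]
  rw [hlen, PySem.List.pyRange_zero_natCast, List.countP_map, List.countP_map]
  apply List.countP_congr
  intro k hk
  simp [Function.comp, PySem.List.pyGetD_natCast]

theorem ysGetD (lines : List (Int × Int)) (low high : Int) (k : Nat) (hk : k < lines.length) :
    (lines.map (fun p => (p.1 * low + p.2, p.1 * high + p.2))).getD k ((0:Int),(0:Int))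
      = (pvA lines low k, pvA lines high k) := by
  rw [List.getD_eq_getElem?_getD, List.getElem?_map, List.getElem?_eq_getElem hk]
  simp [pvA, List.getD_eq_getElem?_getD, List.getElem?_eq_getElem hk]

theorem solve_alt_char (lines : List (Int × Int)) (low high : Int) :
    solve_alt lines low high =
      ((List.range lines.length).countP
        (fun k => decide (∃ l, l < lines.length ∧ l ≠ k ∧ pvInter lines low high k l)) : Int) := by
  unfold solve_alt
  rw [PySem.List.foldl_if_add_one, zero_add]
  congr 1
  rw [countP_enumerate_zero _ _ ((0:Int),(0:Int)), List.length_map]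
  apply List.countP_congr
  intro k hk
  simp only [List.mem_range] at hk
  rw [ysGetD lines low high k hk]
  rw [List.any_eq_true, decide_eq_true_eq]
  constructor
  · rintro ⟨e2, he2, hc⟩
    rw [PySem.List.mem_enumerate_iff] at he2
    obtain ⟨l, hl, rfl⟩ := he2
    rw [List.length_map] at hl
    simp only [zero_add, Bool.and_eq_true, Bool.not_eq_true', decide_eq_false_iff_not,
      decide_eq_true_eq] at hc
    have hys : (lines.map (fun p => (p.1 * low + p.2, p.1 * high + p.2)))[l]'(by simpa using hl)
        = (pvA lines low l, pvA lines high l) := by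
      simp [pvA, List.getD_eq_getElem?_getD, List.getElem?_eq_getElem hl]
    rw [hys] at hc
    refine ⟨l, hl, fun hlk => hc.1 (by exact_mod_cast congrArg (fun (x : Nat) => (x : Int)) hlk), hc.2⟩
  · rintro ⟨l, hl, hlk, hint⟩
    refine ⟨((l : Int), (lines.map (fun p => (p.1 * low + p.2, p.1 * high + p.2)))[l]'(by simpa using hl)), ?_, ?_⟩
    · rw [PySem.List.mem_enumerate_iff]
      exact ⟨l, by simpa using hl, by simp⟩
    · have hys : (lines.map (fun p => (p.1 * low + p.2, p.1 * high + p.2)))[l]'(by simpa using hl)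
          = (pvA lines low l, pvA lines high l) := by
        simp [pvA, List.getD_eq_getElem?_getD, List.getElem?_eq_getElem hl]
      rw [hys]
      simp only [Bool.and_eq_true, Bool.not_eq_true', decide_eq_false_iff_not, decide_eq_true_eq]
      exact ⟨fun hc => hlk (by exact_mod_cast hc), hint⟩

-- ===== VERDICT (by name: the statement is the Claim_ definition above) =====
theorem solve_spec : Claim_equal_solve := by
  intro lines low high _
  unfold Spec_solve
  rw [solve_char, solve_alt_char]
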